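-- pv_equiv track=rewrite | github.com/sehrawatrahul2001/customer-behavior-analysis | python/validate_customer_sql.py | split_sql_queries
-- ===== SOURCE A (Python) =====
-- def split_sql_queries(sql_text: str) -> list[str]:
--     queries: list[str] = []
--     current_lines: list[str] = []
--
--     for line in sql_text.splitlines():
--         stripped = line.strip()
--         if not stripped or stripped.startswith("--"):
--             continue
--         current_lines.append(line)
--         if stripped.endswith(";"):
--             query = "\n".join(current_lines).strip().rstrip(";")
--             if query:
--                 queries.append(query)
--             current_lines = []
--
--     if current_lines:
--         query = "\n".join(current_lines).strip().rstrip(";")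
--         if query:
--             queries.append(query)
--
--     return queries
-- ===== SOURCE B (Python) =====
-- def _meaningful(sql_text):
--     # one pass: keep original lines whose stripped form is non-empty and not a comment
--     return [ln for ln in sql_text.splitlines()
--             if ln.strip() and not ln.strip().startswith("--")]
--
--
-- def _render(group):
--     return "\n".join(group).strip().rstrip(";")
--
--
-- def split_sql_queries(sql_text: str) -> list[str]:
--     lines = _meaningful(sql_text)
--     # boundary indices: one past each line that terminates a query with ';'
--     ends = [i + 1 for i, ln in enumerate(lines) if ln.strip().endswith(";")]
--     result = []
--     for s, e in zip([0] + ends, ends + [len(lines)]):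
--         q = _render(lines[s:e])
--         if q:
--             result.append(q)
--     return result
-- ===== Notes on version B (the rewrite author's own statement) =====
-- stated objective: alternative
-- what changed: A's fused accumulate-and-flush loop is replaced by a three-stage decomposition: filter the meaningful lines, record the boundary indices just past each semicolon-terminated line, then slice the filtered list at those boundaries and render each slice.
import Mathlib
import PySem

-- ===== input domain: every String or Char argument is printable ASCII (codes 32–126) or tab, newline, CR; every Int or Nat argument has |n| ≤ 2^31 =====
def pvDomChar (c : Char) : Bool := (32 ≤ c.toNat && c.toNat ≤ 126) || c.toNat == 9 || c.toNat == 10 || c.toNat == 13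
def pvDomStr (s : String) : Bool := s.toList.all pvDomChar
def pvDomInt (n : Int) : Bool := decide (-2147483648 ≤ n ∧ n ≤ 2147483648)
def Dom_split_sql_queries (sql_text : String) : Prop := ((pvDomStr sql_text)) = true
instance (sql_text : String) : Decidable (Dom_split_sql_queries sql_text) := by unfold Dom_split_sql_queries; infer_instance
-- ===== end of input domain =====

-- B replaces A's fused accumulate-and-flush loop by a filter-lines / record-terminator-indices / slice-into-groups decomposition (objective: alternative, same cost).

-- hand port of Python's str.rstrip(";") (PySem has no rstrip-with-chars): exact — drops exactly the trailing ';' characters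
def pvRstripSemi (s : String) : String :=
  String.ofList ((s.toList.reverse.dropWhile (fun c => c == ';')).reverse)

-- ===== PORT A =====
def split_sql_queries (sql_text : String) : List String :=
  let step := fun (st : List String × List String) (line : String) =>
    let stripped := PySem.Str.strip line
    if stripped == "" || PySem.Str.startswith stripped "--" then st
    else
      let current_lines := st.2 ++ [line]
      if PySem.Str.endswith stripped ";" then
        let query := pvRstripSemi (PySem.Str.strip (PySem.Str.join "\n" current_lines))
        (if query ≠ "" then st.1 ++ [query] else st.1, [])
      else (st.1, current_lines)
  let r := (PySem.Str.splitlines sql_text).foldl step ([], [])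
  if r.2 ≠ [] then
    let query := pvRstripSemi (PySem.Str.strip (PySem.Str.join "\n" r.2))
    if query ≠ "" then r.1 ++ [query] else r.1
  else r.1

-- ===== PORT B =====
-- Source B _meaningful: keep original lines whose stripped form is non-empty and not a comment
def pvMeaningful (sql_text : String) : List String :=
  (PySem.Str.splitlines sql_text).filter
    (fun ln => !(PySem.Str.strip ln == "") && !PySem.Str.startswith (PySem.Str.strip ln) "--")

-- Source B _render
def pvRender (group : List String) : String :=
  pvRstripSemi (PySem.Str.strip (PySem.Str.join "\n" group))

def split_sql_queries_alt (sql_text : String) : List String :=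
  let lines := pvMeaningful sql_text
  let ends := (PySem.List.enumerate lines).filterMap
    (fun p => if PySem.Str.endswith (PySem.Str.strip p.2) ";" then some (p.1 + 1) else none)
  ((((0 : Int) :: ends).zip (ends ++ [(lines.length : Int)]))).foldl
    (fun result se =>
      let q := pvRender (PySem.List.slice lines (some se.1) (some se.2))
      if q ≠ "" then result ++ [q] else result) []

-- ===== PRECONDITION & SPEC =====
def Spec_split_sql_queries (sql_text : String) (out : List String) : Prop := out = split_sql_queries_alt sql_text
instance (sql_text : String) (out : List String) : Decidable (Spec_split_sql_queries sql_text out) := by unfold Spec_split_sql_queries; infer_instance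

-- ===== CLAIM (what is proved, stated in full; the proofs are below) =====
def Claim_equal_split_sql_queries : Prop := ∀ (sql_text : String), Dom_split_sql_queries sql_text → Spec_split_sql_queries sql_text (split_sql_queries sql_text)

-- ===== LEMMAS AND PROOFS =====

-- abstract vocabulary
def pvKeep (ln : String) : Bool := !(PySem.Str.strip ln == "" || PySem.Str.startswith (PySem.Str.strip ln) "--")
def pvEnds (ln : String) : Bool := PySem.Str.endswith (PySem.Str.strip ln) ";"
def pvProc (g : List String) : Option String := if pvRender g ≠ "" then some (pvRender g) else none

-- canonical recursive grouping of (already filtered) lines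
def pvGroup : List String → List (List String)
  | [] => []
  | l :: ls =>
    if pvEnds l then [l] :: pvGroup ls
    else match pvGroup ls with
      | [] => [[l]]
      | g :: gs => (l :: g) :: gs

def pvConsFirst (cur : List String) (gs : List (List String)) : List (List String) :=
  if cur = [] then gs else match gs with | [] => [cur] | g :: t => (cur ++ g) :: t

-- 1-based terminator positions
def pvE : List String → List Nat
  | [] => []
  | l :: ls => (if pvEnds l then [1] else []) ++ (pvE ls).map (· + 1)

-- segments of ls between consecutive boundaries
def pvSegs (s : Nat) (es : List Nat) (n : Nat) (ls : List String) : List (List String) :=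
  match es with
  | [] => [(ls.drop s).take (n - s)]
  | e :: es' => (ls.drop s).take (e - s) :: pvSegs e es' n ls

def pvGN (ls : List String) : List (List String) := pvSegs 0 (pvE ls) ls.length ls

-- trailing-empty-segment flag: true iff ls is empty or its last line ends with ';'
def pvTl : List String → Bool
  | [] => true
  | [l] => pvEnds l
  | _ :: l :: ls => pvTl (l :: ls)

def pvStepA : (List String × List String) → String → (List String × List String) :=
  fun st line =>
    let stripped := PySem.Str.strip line
    if stripped == "" || PySem.Str.startswith stripped "--" then st
    else
      let current_lines := st.2 ++ [line]
      if PySem.Str.endswith stripped ";" then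
        let query := pvRstripSemi (PySem.Str.strip (PySem.Str.join "\n" current_lines))
        (if query ≠ "" then st.1 ++ [query] else st.1, [])
      else (st.1, current_lines)

def pvPostA (r : List String × List String) : List String :=
  if r.2 ≠ [] then
    if pvRender r.2 ≠ "" then r.1 ++ [pvRender r.2] else r.1
  else r.1

theorem pvProc_nil : pvProc [] = none := by decide

theorem pvStepA_skip (st : List String × List String) (line : String)
    (h : pvKeep line = false) : pvStepA st line = st := by
  unfold pvKeep at h
  unfold pvStepA
  cases hcond : (PySem.Str.strip line == "" || PySem.Str.startswith (PySem.Str.strip line) "--") with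
  | false => rw [hcond] at h; simp at h
  | true => simp only [hcond]; simp

theorem pvStepA_keep_ends (st : List String × List String) (l : String)
    (h : pvKeep l = true) (he : pvEnds l = true) :
    pvStepA st l = ((if pvRender (st.2 ++ [l]) ≠ "" then st.1 ++ [pvRender (st.2 ++ [l])] else st.1), []) := by
  have hc : (PySem.Str.strip l == "" || PySem.Str.startswith (PySem.Str.strip l) "--") = false := by
    simpa only [pvKeep, Bool.not_eq_true'] using h
  unfold pvStepA
  simp only [hc, Bool.false_eq_true, if_false]
  simp only [pvEnds] at he
  simp only [he, if_true]
  rfl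

theorem pvStepA_keep_not (st : List String × List String) (l : String)
    (h : pvKeep l = true) (he : pvEnds l = false) :
    pvStepA st l = (st.1, st.2 ++ [l]) := by
  have hc : (PySem.Str.strip l == "" || PySem.Str.startswith (PySem.Str.strip l) "--") = false := by
    simpa only [pvKeep, Bool.not_eq_true'] using h
  unfold pvStepA
  simp only [hc, Bool.false_eq_true, if_false]
  simp only [pvEnds] at he
  simp only [he, Bool.false_eq_true, if_false]

theorem pvFoldl_filter (ls : List String) (st : List String × List String) :
    ls.foldl pvStepA st = (ls.filter pvKeep).foldl pvStepA st := by
  induction ls generalizing st with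
  | nil => rfl
  | cons l ls ih =>
    by_cases h : pvKeep l = true
    · simp [h, List.foldl_cons, ih]
    · simp only [Bool.not_eq_true] at h
      simp [h, List.foldl_cons, pvStepA_skip _ _ h, ih]

theorem pvRender_nil : pvRender [] = "" := by decide

theorem pvPostA_eq (qs cur : List String) : pvPostA (qs, cur) = qs ++ (pvProc cur).toList := by
  unfold pvPostA pvProc
  cases cur with
  | nil => simp [pvRender_nil]
  | cons c cs => by_cases h : pvRender (c :: cs) ≠ "" <;> simp [h]

theorem pvConsFirst_snoc (cur : List String) (l : String) (gs : List (List String)) :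
    pvConsFirst (cur ++ [l]) gs =
      pvConsFirst cur (match gs with | [] => [[l]] | g :: t => (l :: g) :: t) := by
  cases gs with
  | nil => by_cases h : cur = [] <;> simp [pvConsFirst, h]
  | cons g t => by_cases h : cur = [] <;> simp [pvConsFirst, h]

theorem pvA_char (ls : List String) (h : ∀ x ∈ ls, pvKeep x = true) (qs cur : List String) :
    pvPostA (ls.foldl pvStepA (qs, cur)) =
      qs ++ List.filterMap pvProc (pvConsFirst cur (pvGroup ls)) := by
  induction ls generalizing qs cur with
  | nil =>
    simp only [List.foldl_nil, pvPostA_eq, pvGroup]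
    by_cases hc : cur = []
    · simp [pvConsFirst, hc, pvProc_nil]
    · simp only [pvConsFirst, hc, if_false]
      cases hp : pvProc cur <;> simp [hp]
  | cons l ls ih =>
    have hl : pvKeep l = true := h l (List.mem_cons_self ..)
    have hls : ∀ x ∈ ls, pvKeep x = true := fun x hx => h x (List.mem_cons_of_mem _ hx)
    rw [List.foldl_cons]
    by_cases he : pvEnds l
    · rw [pvStepA_keep_ends (qs, cur) l hl he, ih hls]
      have hgrp : pvGroup (l :: ls) = [l] :: pvGroup ls := by simp [pvGroup, he]
      have hcf : pvConsFirst cur ([l] :: pvGroup ls) = (cur ++ [l]) :: pvGroup ls := by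
        by_cases hc : cur = [] <;> simp [pvConsFirst, hc]
      have hcf0 : pvConsFirst ([] : List String) (pvGroup ls) = pvGroup ls := by
        simp [pvConsFirst]
      rw [hgrp, hcf, hcf0, List.filterMap_cons]
      by_cases hq : pvRender (cur ++ [l]) = ""
      · simp [pvProc, hq]
      · simp [pvProc, hq]
    · simp only [Bool.not_eq_true] at he
      rw [pvStepA_keep_not (qs, cur) l hl he, ih hls, pvConsFirst_snoc]
      have hgrp : pvGroup (l :: ls) =
          (match pvGroup ls with | [] => [[l]] | g :: t => (l :: g) :: t) := by
        simp [pvGroup, he]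
      rw [hgrp]

-- B-side fold = filterMap
theorem pvB_fold (lines : List String) (L : List (Int × Int)) (acc : List String) :
    L.foldl (fun result se =>
        let q := pvRender (PySem.List.slice lines (some se.1) (some se.2))
        if q ≠ "" then result ++ [q] else result) acc =
      acc ++ L.filterMap (fun se => pvProc (PySem.List.slice lines (some se.1) (some se.2))) := by
  induction L generalizing acc with
  | nil => simp
  | cons p L ih =>
    simp only [List.foldl_cons, List.filterMap_cons, ih]
    by_cases hq : pvRender (PySem.List.slice lines (some p.1) (some p.2)) ≠ ""
    · simp [pvProc, hq]
    · simp [pvProc, hq]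

-- the Int terminator list of the port is the Nat-level pvE, cast
theorem pvEnum_eq (ls : List String) (s : Int) :
    (PySem.List.enumerate ls s).filterMap
        (fun p => if PySem.Str.endswith (PySem.Str.strip p.2) ";" then some (p.1 + 1) else none) =
      (pvE ls).map (fun (n : Nat) => s + (n : Int)) := by
  induction ls generalizing s with
  | nil => rfl
  | cons l ls ih =>
    rw [show PySem.List.enumerate (l :: ls) s = (s, l) :: PySem.List.enumerate ls (s + 1) from rfl,
        List.filterMap_cons, ih (s + 1)]
    simp only [pvE, pvEnds, List.map_append, List.map_map]
    by_cases he : PySem.Str.endswith (PySem.Str.strip l) ";"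
    · simp only [he, if_true, List.map_cons, List.map_nil, List.singleton_append]
      congr 1
      apply List.map_congr_left
      intro n _
      simp only [Function.comp_apply]
      push_cast
      ring
    · simp only [he, Bool.false_eq_true, if_false, List.map_nil, List.nil_append]
      apply List.map_congr_left
      intro n _
      simp only [Function.comp_apply]
      push_cast
      ring

-- shift lemma for segments
theorem pvSegs_shift (es : List Nat) (s n : Nat) (l : String) (ls : List String) :
    pvSegs (s + 1) (es.map (· + 1)) (n + 1) (l :: ls) = pvSegs s es n ls := by
  induction es generalizing s with
  | nil => simp [pvSegs, Nat.succ_sub_succ]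
  | cons e es ih => simp [pvSegs, Nat.succ_sub_succ, ih]

theorem pvGN_cons_ends (l : String) (ls : List String) (he : pvEnds l = true) :
    pvGN (l :: ls) = [l] :: pvGN ls := by
  have h := pvSegs_shift (pvE ls) 0 ls.length l ls
  unfold pvGN
  simp only [pvE, he, if_true, List.singleton_append, List.length_cons]
  show List.take (1 - 0) (List.drop 0 (l :: ls)) ::
      pvSegs (0 + 1) ((pvE ls).map (· + 1)) (ls.length + 1) (l :: ls) = _
  rw [h]
  simp

theorem pvGN_cons_not_ends (l : String) (ls : List String) (he : pvEnds l = false)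
    (g : List String) (gs : List (List String)) (hg : pvGN ls = g :: gs) :
    pvGN (l :: ls) = (l :: g) :: gs := by
  unfold pvGN
  simp only [pvE, he, Bool.false_eq_true, if_false, List.nil_append, List.length_cons]
  unfold pvGN at hg
  cases hE : pvE ls with
  | nil =>
    rw [hE] at hg
    simp only [pvSegs, List.drop_zero, Nat.sub_zero, List.take_length] at hg
    obtain ⟨hg1, hg2⟩ := List.cons.inj hg
    subst hg2
    simp only [List.map_nil, pvSegs, List.drop_zero, Nat.sub_zero]
    rw [← hg1]
    simp [List.take_of_length_le]
  | cons e es =>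
    rw [hE] at hg
    simp only [pvSegs, List.drop_zero, Nat.sub_zero] at hg ⊢
    simp only [List.map_cons]
    show List.take ((e + 1) - 0) (List.drop 0 (l :: ls)) ::
        pvSegs (e + 1) (es.map (· + 1)) (ls.length + 1) (l :: ls) = _
    rw [pvSegs_shift es e ls.length l ls]
    simp only [List.drop_zero, Nat.sub_zero, List.take_succ_cons]
    obtain ⟨hg1, hg2⟩ := List.cons.inj hg
    rw [hg1, hg2]

theorem pvGroup_ne_nil (l : String) (ls : List String) : pvGroup (l :: ls) ≠ [] := by
  unfold pvGroup
  by_cases he : pvEnds l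
  · simp [he]
  · simp only [he, Bool.false_eq_true, if_false]
    cases pvGroup ls <;> simp

-- pvGN is pvGroup plus (iff pvTl) one trailing empty segment
theorem pvGN_eq (ls : List String) :
    pvGN ls = pvGroup ls ++ (if pvTl ls then [[]] else []) := by
  induction ls with
  | nil => simp [pvGN, pvE, pvSegs, pvGroup, pvTl]
  | cons l ls ih =>
    by_cases he : pvEnds l
    · rw [pvGN_cons_ends l ls he, ih]
      cases ls with
      | nil => simp [pvGroup, pvTl, he]
      | cons a b =>
        have ht : pvTl (l :: a :: b) = pvTl (a :: b) := rfl
        simp [pvGroup, he, ht]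
    · replace he : pvEnds l = false := by simpa using he
      have hne : pvGroup ls ++ (if pvTl ls then [[]] else []) ≠ [] := by
        cases ls with
        | nil => simp [pvGroup, pvTl]
        | cons a b =>
          intro hcon
          rcases List.append_eq_nil_iff.mp hcon with ⟨h1, _⟩
          exact pvGroup_ne_nil a b h1
      obtain ⟨g, gs, hg'⟩ := List.exists_cons_of_ne_nil hne
      rw [pvGN_cons_not_ends l ls he g gs (ih.trans hg')]
      cases ls with
      | nil =>
        simp only [pvGroup, pvTl, List.nil_append] at hg'
        obtain ⟨hg1, hg2⟩ := List.cons.inj hg'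
        subst hg2
        simp [pvGroup, pvTl, he, ← hg1]
      | cons a b =>
        obtain ⟨g', t, hgr⟩ := List.exists_cons_of_ne_nil (pvGroup_ne_nil a b)
        rw [hgr, List.cons_append] at hg'
        obtain ⟨hg1, hg2⟩ := List.cons.inj hg'
        have ht : pvTl (l :: a :: b) = pvTl (a :: b) := rfl
        have hgrp : pvGroup (l :: a :: b) = (l :: g') :: t := by
          rw [show pvGroup (l :: a :: b) = if pvEnds l then [l] :: pvGroup (a :: b)
                else (match pvGroup (a :: b) with | [] => [[l]] | g :: gs => (l :: g) :: gs) from rfl,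
              he, hgr]
          simp
        rw [hgrp, ht, List.cons_append, hg1, hg2]

theorem pvTl_trailing (ls : List String) :
    List.filterMap pvProc (if pvTl ls then [([] : List String)] else []) = [] := by
  by_cases h : pvTl ls <;> simp [h, pvProc_nil]

theorem pvMeaningful_eq (s : String) :
    pvMeaningful s = (PySem.Str.splitlines s).filter pvKeep := by
  unfold pvMeaningful
  apply List.filter_congr
  intro x _
  simp [pvKeep, Bool.not_or]

-- A's result in canonical form
theorem pvA_eq (s : String) :
    split_sql_queries s =
      List.filterMap pvProc (pvGroup ((PySem.Str.splitlines s).filter pvKeep)) := by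
  show pvPostA ((PySem.Str.splitlines s).foldl pvStepA ([], [])) = _
  rw [pvFoldl_filter]
  rw [pvA_char _ (fun x hx => List.of_mem_filter hx) [] []]
  simp [pvConsFirst]

-- B's result in canonical form
theorem pvB_eq (s : String) :
    split_sql_queries_alt s = List.filterMap pvProc (pvGN (pvMeaningful s)) := by
  show (((0 : Int) :: (PySem.List.enumerate (pvMeaningful s)).filterMap
      (fun p => if PySem.Str.endswith (PySem.Str.strip p.2) ";" then some (p.1 + 1) else none)).zip
        ((PySem.List.enumerate (pvMeaningful s)).filterMap
          (fun p => if PySem.Str.endswith (PySem.Str.strip p.2) ";" then some (p.1 + 1) else none)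
          ++ [((pvMeaningful s).length : Int)])).foldl _ [] = _
  rw [pvB_fold, List.nil_append]
  have hE : (PySem.List.enumerate (pvMeaningful s)).filterMap
      (fun p => if PySem.Str.endswith (PySem.Str.strip p.2) ";" then some (p.1 + 1) else none) =
      (pvE (pvMeaningful s)).map (fun (n : Nat) => (n : Int)) := by
    rw [show PySem.List.enumerate (pvMeaningful s) = PySem.List.enumerate (pvMeaningful s) 0 from rfl,
        pvEnum_eq (pvMeaningful s) 0]
    simp
  rw [hE]
  have hz : (((0 : Int) :: (pvE (pvMeaningful s)).map (fun (n : Nat) => (n : Int))).zip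
        ((pvE (pvMeaningful s)).map (fun (n : Nat) => (n : Int)) ++ [((pvMeaningful s).length : Int)])) =
      ((0 :: pvE (pvMeaningful s)).zip (pvE (pvMeaningful s) ++ [(pvMeaningful s).length])).map
        (Prod.map (fun (n : Nat) => (n : Int)) (fun (n : Nat) => (n : Int))) := by
    rw [← List.zip_map]
    simp
  rw [hz, List.filterMap_map]
  have hcg : ∀ se ∈ ((0 :: pvE (pvMeaningful s)).zip (pvE (pvMeaningful s) ++ [(pvMeaningful s).length])),
      ((fun se : Int × Int => pvProc (PySem.List.slice (pvMeaningful s) (some se.1) (some se.2))) ∘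
        Prod.map (fun (n : Nat) => (n : Int)) (fun (n : Nat) => (n : Int))) se =
      pvProc (List.take (se.2 - se.1) (List.drop se.1 (pvMeaningful s))) := by
    intro se _
    obtain ⟨a, b⟩ := se
    simp only [Function.comp_apply, Prod.map_apply]
    rw [PySem.List.slice_natCast]
  rw [List.filterMap_congr hcg]
  have hseg : ∀ (s0 : Nat) (es : List Nat) (n : Nat),
      ((s0 :: es).zip (es ++ [n])).filterMap
          (fun se => pvProc (List.take (se.2 - se.1) (List.drop se.1 (pvMeaningful s)))) =
        List.filterMap pvProc (pvSegs s0 es n (pvMeaningful s)) := by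
    intro s0 es n
    induction es generalizing s0 with
    | nil =>
      simp only [pvSegs, List.nil_append, List.zip_cons_cons, List.zip_nil_left,
        List.filterMap_cons, List.filterMap_nil]
    | cons e es ih => simp [pvSegs, List.zip_cons_cons, List.filterMap_cons, ih e]
  rw [hseg 0 (pvE (pvMeaningful s)) (pvMeaningful s).length]
  rfl

-- ===== VERDICT (by name: the statement is the Claim_ definition above) =====
theorem split_sql_queries_spec : Claim_equal_split_sql_queries := by
  intro s _
  show split_sql_queries s = split_sql_queries_alt s
  rw [pvA_eq, pvB_eq, pvMeaningful_eq, pvGN_eq, List.filterMap_append, pvTl_trailing, List.append_nil]
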